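-- pv_equiv track=rewrite | github.com/GKN14/waterdragers-ref-planner | cp_sync.py | bepaal_niveau
-- ===== SOURCE A (Python) =====
-- def bepaal_niveau(team_code: str) -> int:
--     """
--     Bepaal het niveau op basis van de teamcode.
--
--     Niveau-indeling:
--     1 = U10, U12 (X10, X12, V10, V12, M10, M12)
--     2 = U14, U16 recreatie
--     3 = U16 hogere divisie, U18
--     4 = Senioren lager, U20/U22
--     5 = Senioren hoger, MSE
--     """
--     team_upper = team_code.upper()
--
--     # MSE is altijd niveau 5
--     if 'MSE' in team_upper:
--         return 5
--
--     # Extract categorie (X10, V16, M18, etc.)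
--     categorie = ''.join(c for c in team_upper if c.isalpha() or c.isdigit())
--
--     # Niveau bepalen op basis van leeftijdscategorie
--     if any(x in categorie for x in ['X10', 'X12', 'V10', 'V12', 'M10', 'M12', 'U10', 'U12']):
--         return 1
--     elif any(x in categorie for x in ['X14', 'V14', 'M14', 'U14']):
--         return 2
--     elif any(x in categorie for x in ['X16', 'V16', 'M16', 'U16']):
--         return 2  # Kan 2 of 3 zijn, default 2
--     elif any(x in categorie for x in ['X18', 'V18', 'M18', 'U18']):
--         return 3
--     elif any(x in categorie for x in ['M20', 'M22', 'V20', 'V22', 'U20', 'U22']):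
--         return 4
--     else:
--         # Senioren of onbekend
--         return 4
-- ===== SOURCE B (Python) =====
-- LEVEL_BY_AGE = {'10': 1, '12': 1, '14': 2, '16': 2, '18': 3, '20': 4, '22': 4}
--
--
-- def bepaal_niveau(team_code: str) -> int:
--     team_upper = team_code.upper()
--     if 'MSE' in team_upper:
--         return 5
--     cat = [c for c in team_upper if c.isalpha() or c.isdigit()]
--     best = 4
--     for a, b, c in zip(cat, cat[1:], cat[2:]):
--         if a in 'XVMU':
--             lvl = LEVEL_BY_AGE.get(b + c)
--             if lvl is not None and lvl < best:
--                 best = lvl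
--     return best
-- ===== Notes on version B (the rewrite author's own statement) =====
-- stated objective: alternative
-- what changed: Instead of 26 ordered per-level substring scans, B tokenizes the filtered string once with a sliding 3-char window (zip of the list with its two shifted copies), maps each [XVMU]+age token to its level through one dict, and keeps the running minimum.
import Mathlib
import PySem

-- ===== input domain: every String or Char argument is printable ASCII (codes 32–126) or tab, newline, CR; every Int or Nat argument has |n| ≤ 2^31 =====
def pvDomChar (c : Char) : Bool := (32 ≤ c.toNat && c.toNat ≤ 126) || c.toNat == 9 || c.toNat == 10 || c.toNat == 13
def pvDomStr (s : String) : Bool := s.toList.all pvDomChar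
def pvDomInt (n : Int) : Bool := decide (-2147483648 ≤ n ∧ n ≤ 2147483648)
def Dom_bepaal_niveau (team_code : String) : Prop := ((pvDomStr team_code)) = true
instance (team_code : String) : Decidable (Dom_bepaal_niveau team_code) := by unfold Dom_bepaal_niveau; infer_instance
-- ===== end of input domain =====

-- B replaces A's 26 ordered per-level substring scans by one sliding-window pass that maps each
-- letter+age token to its level via a dict and takes the running minimum (alternative decomposition).


-- ===== PORT A =====
-- the five token lists A tests, in branch order
def pvL1 : List (List Char) :=
  [['X','1','0'],['X','1','2'],['V','1','0'],['V','1','2'],['M','1','0'],['M','1','2'],['U','1','0'],['U','1','2']]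
def pvL14 : List (List Char) := [['X','1','4'],['V','1','4'],['M','1','4'],['U','1','4']]
def pvL16 : List (List Char) := [['X','1','6'],['V','1','6'],['M','1','6'],['U','1','6']]
def pvL18 : List (List Char) := [['X','1','8'],['V','1','8'],['M','1','8'],['U','1','8']]
def pvL20 : List (List Char) :=
  [['M','2','0'],['M','2','2'],['V','2','0'],['V','2','2'],['U','2','0'],['U','2','2']]

def bepaal_niveau (team_code : String) : Int :=
  let team_upper := PySem.Chars.upper team_code.toList
  if PySem.Chars.isIn ['M','S','E'] team_upper then 5
  else
    let categorie := team_upper.filter (fun c => PySem.Chars.isalpha c || PySem.Chars.isdigit c)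
    if pvL1.any (fun x => PySem.Chars.isIn x categorie) then 1
    else if pvL14.any (fun x => PySem.Chars.isIn x categorie) then 2
    else if pvL16.any (fun x => PySem.Chars.isIn x categorie) then 2
    else if pvL18.any (fun x => PySem.Chars.isIn x categorie) then 3
    else if pvL20.any (fun x => PySem.Chars.isIn x categorie) then 4
    else 4

-- ===== PORT B =====
def pvLevelByAge : PySem.Dict (List Char) Int :=
  PySem.Dict.mk [(['1','0'],1),(['1','2'],1),(['1','4'],2),(['1','6'],2),(['1','8'],3),(['2','0'],4),(['2','2'],4)]

-- zip(cat, cat[1:], cat[2:])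
def pvWindows (cat : List Char) : List (Char × Char × Char) :=
  cat.zip ((PySem.List.slice cat (some 1) none).zip (PySem.List.slice cat (some 2) none))

-- loop body: one window (a, b, c)
def pvStep (best : Int) (w : Char × Char × Char) : Int :=
  if PySem.Chars.isIn [w.1] ['X','V','M','U'] then
    match PySem.Dict.get? pvLevelByAge [w.2.1, w.2.2] with
    | some lvl => if lvl < best then lvl else best
    | none => best
  else best

def bepaal_niveau_alt (team_code : String) : Int :=
  let team_upper := PySem.Chars.upper team_code.toList
  if PySem.Chars.isIn ['M','S','E'] team_upper then 5
  else
    let cat := team_upper.filter (fun c => PySem.Chars.isalpha c || PySem.Chars.isdigit c)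
    (pvWindows cat).foldl pvStep 4

-- ===== PRECONDITION & SPEC =====
def Spec_bepaal_niveau (team_code : String) (out : Int) : Prop := out = bepaal_niveau_alt team_code
instance (team_code : String) (out : Int) : Decidable (Spec_bepaal_niveau team_code out) := by unfold Spec_bepaal_niveau; infer_instance

-- ===== CLAIM (what is proved, stated in full; the proofs are below) =====
def Claim_equal_bepaal_niveau : Prop := ∀ (team_code : String), Dom_bepaal_niveau team_code → Spec_bepaal_niveau team_code (bepaal_niveau team_code)

-- ===== LEMMAS AND PROOFS =====

-- the level a single window contributes (4 = no token)
def pvHl (a b c : Char) : Int :=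
  if a = 'X' ∨ a = 'V' ∨ a = 'M' ∨ a = 'U' then PySem.Dict.getD pvLevelByAge [b,c] 4 else 4

-- minimum window level over the whole list, sliding left to right
def pvSpecMin : List Char → Int
  | a :: b :: c :: rest => min (pvHl a b c) (pvSpecMin (b :: c :: rest))
  | _ => 4

lemma pv_isIn_singleton (a : Char) (l : List Char) : PySem.Chars.isIn [a] l = true ↔ a ∈ l := by
  rw [PySem.Chars.isIn_iff_infix]
  constructor
  · intro h; exact (List.singleton_sublist).1 h.sublist
  · intro h; obtain ⟨s, t, rfl⟩ := List.append_of_mem h; exact ⟨s, t, by simp⟩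

lemma pvGetD_ge_one (b c : Char) : 1 ≤ PySem.Dict.getD pvLevelByAge [b,c] 4 := by
  simp only [pvLevelByAge, PySem.Dict.getD_eq_get?_getD, PySem.Dict.get?, List.find?_cons, List.find?_nil]
  repeat' split
  all_goals simp_all

lemma pvGetD_le_four (b c : Char) : PySem.Dict.getD pvLevelByAge [b,c] 4 ≤ 4 := by
  simp only [pvLevelByAge, PySem.Dict.getD_eq_get?_getD, PySem.Dict.get?, List.find?_cons, List.find?_nil]
  repeat' split
  all_goals simp_all

lemma pvHl_ge_one (a b c : Char) : 1 ≤ pvHl a b c := by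
  unfold pvHl; split_ifs
  · exact pvGetD_ge_one b c
  · norm_num

lemma pvHl_le_four (a b c : Char) : pvHl a b c ≤ 4 := by
  unfold pvHl; split_ifs
  · exact pvGetD_le_four b c
  · norm_num

theorem pvSpecMin_bounds : ∀ cat : List Char, 1 ≤ pvSpecMin cat ∧ pvSpecMin cat ≤ 4
  | [] => by simp [pvSpecMin]
  | [_] => by simp [pvSpecMin]
  | [_, _] => by simp [pvSpecMin]
  | a :: b :: c :: rest => by
      have ih := pvSpecMin_bounds (b :: c :: rest)
      have h1 := pvHl_ge_one a b c
      have h2 := pvHl_le_four a b c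
      simp only [pvSpecMin]
      omega

lemma pvWindows_nil : pvWindows [] = [] := by simp [pvWindows, PySem.List.slice]
lemma pvWindows_one (a : Char) : pvWindows [a] = [] := by simp [pvWindows, PySem.List.slice]
lemma pvWindows_two (a b : Char) : pvWindows [a, b] = [] := by simp [pvWindows, PySem.List.slice]

lemma pvWindows_cons (a b c : Char) (rest : List Char) :
    pvWindows (a :: b :: c :: rest) = (a, b, c) :: pvWindows (b :: c :: rest) := by
  simp [pvWindows, PySem.List.slice]

lemma pvStep_eq_min (a b c : Char) (best : Int) (hbest : best ≤ 4) :
    pvStep best (a, b, c) = min best (pvHl a b c) := by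
  unfold pvStep pvHl
  by_cases ha : a = 'X' ∨ a = 'V' ∨ a = 'M' ∨ a = 'U'
  · have hin : PySem.Chars.isIn [a] ['X','V','M','U'] = true := by
      rw [pv_isIn_singleton]; simp only [List.mem_cons, List.not_mem_nil, or_false]; tauto
    rw [if_pos hin, if_pos ha, PySem.Dict.getD_eq_get?_getD]
    cases hg : PySem.Dict.get? pvLevelByAge [b, c] with
    | none =>
        show best = min best (Option.getD none 4)
        simp only [Option.getD_none]; omega
    | some lvl =>
        show (if lvl < best then lvl else best) = min best (Option.getD (some lvl) 4)
        simp only [Option.getD_some]; split_ifs <;> omega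
  · have hin : PySem.Chars.isIn [a] ['X','V','M','U'] = false := by
      rw [Bool.eq_false_iff, Ne, pv_isIn_singleton]
      simp only [List.mem_cons, List.not_mem_nil, or_false]; tauto
    rw [if_neg (by simp [hin]), if_neg ha]
    omega

theorem pvFold_eq : ∀ (cat : List Char) (best : Int), best ≤ 4 →
    (pvWindows cat).foldl pvStep best = min best (pvSpecMin cat)
  | [], best, h => by rw [pvWindows_nil]; simp [pvSpecMin]; omega
  | [a], best, h => by rw [pvWindows_one]; simp [pvSpecMin]; omega
  | [a, b], best, h => by rw [pvWindows_two]; simp [pvSpecMin]; omega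
  | a :: b :: c :: rest, best, h => by
      rw [pvWindows_cons, List.foldl_cons, pvStep_eq_min a b c best h]
      have hhl := pvHl_le_four a b c
      rw [pvFold_eq (b :: c :: rest) (min best (pvHl a b c)) (by omega)]
      show _ = min best (pvSpecMin (a :: b :: c :: rest))
      simp only [pvSpecMin]
      omega

theorem pvSpecMin_le_iff : ∀ (cat : List Char) (k : Int), k ≤ 3 →
    (pvSpecMin cat ≤ k ↔ ∃ a b c, [a,b,c] <:+: cat ∧ pvHl a b c ≤ k)
  | [], k, hk => by
      simp only [pvSpecMin]
      constructor
      · intro h; omega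
      · rintro ⟨a, b, c, hinf, -⟩; have := hinf.length_le; simp at this
  | [x], k, hk => by
      simp only [pvSpecMin]
      constructor
      · intro h; omega
      · rintro ⟨a, b, c, hinf, -⟩; have := hinf.length_le; simp at this
  | [x, y], k, hk => by
      simp only [pvSpecMin]
      constructor
      · intro h; omega
      · rintro ⟨a, b, c, hinf, -⟩; have := hinf.length_le; simp at this
  | x :: y :: z :: rest, k, hk => by
      have ih := pvSpecMin_le_iff (y :: z :: rest) k hk
      simp only [pvSpecMin, min_le_iff]
      rw [ih]
      constructor
      · rintro (h | ⟨a, b, c, hinf, hh⟩)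
        · exact ⟨x, y, z, ⟨[], rest, rfl⟩, h⟩
        · obtain ⟨s, t, heq⟩ := hinf
          exact ⟨a, b, c, ⟨x :: s, t, by simp [heq]⟩, hh⟩
      · rintro ⟨a, b, c, hinf, hh⟩
        rcases List.infix_cons_iff.1 hinf with hpre | htail
        · left
          rw [List.cons_prefix_cons] at hpre
          obtain ⟨rfl, hpre⟩ := hpre
          rw [List.cons_prefix_cons] at hpre
          obtain ⟨rfl, hpre⟩ := hpre
          rw [List.cons_prefix_cons] at hpre
          obtain ⟨rfl, -⟩ := hpre
          exact hh
        · right; exact ⟨a, b, c, htail, hh⟩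

lemma pvHl_le_one_iff (a b c : Char) : pvHl a b c ≤ 1 ↔ [a,b,c] ∈ pvL1 := by
  simp only [pvHl, pvL1, pvLevelByAge, PySem.Dict.getD_eq_get?_getD, PySem.Dict.get?,
    List.find?_cons, List.find?_nil, List.mem_cons, List.not_mem_nil]
  repeat' split
  all_goals aesop

lemma pvHl_le_two_iff (a b c : Char) : pvHl a b c ≤ 2 ↔ [a,b,c] ∈ pvL1 ++ pvL14 ++ pvL16 := by
  simp only [pvHl, pvL1, pvL14, pvL16, pvLevelByAge, PySem.Dict.getD_eq_get?_getD, PySem.Dict.get?,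
    List.find?_cons, List.find?_nil, List.mem_append, List.mem_cons, List.not_mem_nil]
  repeat' split
  all_goals aesop

lemma pvHl_le_three_iff (a b c : Char) : pvHl a b c ≤ 3 ↔ [a,b,c] ∈ pvL1 ++ pvL14 ++ pvL16 ++ pvL18 := by
  simp only [pvHl, pvL1, pvL14, pvL16, pvL18, pvLevelByAge, PySem.Dict.getD_eq_get?_getD, PySem.Dict.get?,
    List.find?_cons, List.find?_nil, List.mem_append, List.mem_cons, List.not_mem_nil]
  repeat' split
  all_goals aesop

lemma pv_any_iff (L : List (List Char)) (cat : List Char) (hL : ∀ t ∈ L, t.length = 3) :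
    (L.any (fun x => PySem.Chars.isIn x cat) = true) ↔ ∃ a b c, [a,b,c] <:+: cat ∧ [a,b,c] ∈ L := by
  rw [List.any_eq_true]
  constructor
  · rintro ⟨t, ht, hin⟩
    have hinf := (PySem.Chars.isIn_iff_infix t cat).1 hin
    have h3 := hL t ht
    match t, h3 with
    | [a, b, c], _ => exact ⟨a, b, c, hinf, ht⟩
  · rintro ⟨a, b, c, hinf, hmem⟩
    exact ⟨[a, b, c], hmem, (PySem.Chars.isIn_iff_infix _ cat).2 hinf⟩

-- the core fact: A's ordered branch scan equals the sliding-window minimum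
theorem pvCore (cat : List Char) :
    (if pvL1.any (fun x => PySem.Chars.isIn x cat) then (1 : Int)
     else if pvL14.any (fun x => PySem.Chars.isIn x cat) then 2
     else if pvL16.any (fun x => PySem.Chars.isIn x cat) then 2
     else if pvL18.any (fun x => PySem.Chars.isIn x cat) then 3
     else if pvL20.any (fun x => PySem.Chars.isIn x cat) then 4
     else 4) = pvSpecMin cat := by
  have hb := pvSpecMin_bounds cat
  have h1 : (pvL1.any (fun x => PySem.Chars.isIn x cat) = true) ↔ pvSpecMin cat ≤ 1 := by
    rw [pv_any_iff _ _ (by decide), pvSpecMin_le_iff cat 1 (by norm_num)]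
    simp only [pvHl_le_one_iff]
  have h2 : ((pvL1 ++ pvL14 ++ pvL16).any (fun x => PySem.Chars.isIn x cat) = true) ↔ pvSpecMin cat ≤ 2 := by
    rw [pv_any_iff _ _ (by decide), pvSpecMin_le_iff cat 2 (by norm_num)]
    simp only [pvHl_le_two_iff]
  have h3 : ((pvL1 ++ pvL14 ++ pvL16 ++ pvL18).any (fun x => PySem.Chars.isIn x cat) = true) ↔ pvSpecMin cat ≤ 3 := by
    rw [pv_any_iff _ _ (by decide), pvSpecMin_le_iff cat 3 (by norm_num)]
    simp only [pvHl_le_three_iff]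
  simp only [List.any_append, Bool.or_eq_true] at h2 h3
  by_cases c1 : pvL1.any (fun x => PySem.Chars.isIn x cat) = true
  · rw [if_pos c1]
    have := h1.1 c1
    omega
  · rw [if_neg c1]
    have hn1 : ¬ pvSpecMin cat ≤ 1 := fun h => c1 (h1.2 h)
    by_cases c14 : pvL14.any (fun x => PySem.Chars.isIn x cat) = true
    · rw [if_pos c14]
      have : pvSpecMin cat ≤ 2 := h2.1 (by tauto)
      omega
    · rw [if_neg c14]
      by_cases c16 : pvL16.any (fun x => PySem.Chars.isIn x cat) = true
      · rw [if_pos c16]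
        have : pvSpecMin cat ≤ 2 := h2.1 (by tauto)
        omega
      · rw [if_neg c16]
        have hn2 : ¬ pvSpecMin cat ≤ 2 := fun h => by
          rcases h2.2 h with (h' | h') | h' <;> tauto
        by_cases c18 : pvL18.any (fun x => PySem.Chars.isIn x cat) = true
        · rw [if_pos c18]
          have : pvSpecMin cat ≤ 3 := h3.1 (by tauto)
          omega
        · rw [if_neg c18]
          have hn3 : ¬ pvSpecMin cat ≤ 3 := fun h => by
            rcases h3.2 h with ((h' | h') | h') | h' <;> tauto
          by_cases c20 : pvL20.any (fun x => PySem.Chars.isIn x cat) = true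
          · rw [if_pos c20]; omega
          · rw [if_neg c20]; omega

-- ===== VERDICT (by name: the statement is the Claim_ definition above) =====
theorem bepaal_niveau_spec : Claim_equal_bepaal_niveau := by
  intro team_code _
  unfold Spec_bepaal_niveau bepaal_niveau bepaal_niveau_alt
  by_cases hm : PySem.Chars.isIn ['M','S','E'] (PySem.Chars.upper team_code.toList) = true
  · simp only [hm, if_true]
  · simp only [hm, if_false, Bool.false_eq_true]
    set cat := (PySem.Chars.upper team_code.toList).filter
      (fun c => PySem.Chars.isalpha c || PySem.Chars.isdigit c) with hcat
    rw [pvFold_eq cat 4 le_rfl, min_eq_right (pvSpecMin_bounds cat).2]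
    exact pvCore cat
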